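-- pv_equiv track=rewrite | github.com/JUANAUTONOMA/AlgoritmiaActividad1 | trabajGlucosa.py | obtenerMedicionPorComida
-- ===== SOURCE A (Python) =====
-- def obtenerMedicionPorComida(mediciones):
--     mediciones_antes_desayuno = []
--     mediciones_despues_desayuno = []
--     mediciones_antes_almuerzo = []
--     mediciones_despues_almuerzo = []
--     mediciones_antes_cena = []
--     mediciones_despues_cena = []
--
--     for i in range(len(mediciones)):
--         if i % 6 == 0:
--             mediciones_antes_desayuno.append(mediciones[i])
--         elif i % 6 == 1:
--             mediciones_despues_desayuno.append(mediciones[i])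
--         elif i % 6 == 2:
--             mediciones_antes_almuerzo.append(mediciones[i])
--         elif i % 6 == 3:
--             mediciones_despues_almuerzo.append(mediciones[i])
--         elif i % 6 == 4:
--             mediciones_antes_cena.append(mediciones[i])
--         elif i % 6 == 5:
--             mediciones_despues_cena.append(mediciones[i])
--
--     return (mediciones_antes_desayuno, mediciones_despues_desayuno,
--             mediciones_antes_almuerzo, mediciones_despues_almuerzo,
--             mediciones_antes_cena, mediciones_despues_cena)
-- ===== SOURCE B (Python) =====
-- def obtenerMedicionPorComida(mediciones):
--     return (list(mediciones[0::6]), list(mediciones[1::6]),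
--             list(mediciones[2::6]), list(mediciones[3::6]),
--             list(mediciones[4::6]), list(mediciones[5::6]))
-- ===== Notes on version B (the rewrite author's own statement) =====
-- stated objective: idiomatic
-- what changed: Replaced the single index loop with mod-6 branch dispatch by six strided slices mediciones[k::6], one per meal bucket.
import Mathlib
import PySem

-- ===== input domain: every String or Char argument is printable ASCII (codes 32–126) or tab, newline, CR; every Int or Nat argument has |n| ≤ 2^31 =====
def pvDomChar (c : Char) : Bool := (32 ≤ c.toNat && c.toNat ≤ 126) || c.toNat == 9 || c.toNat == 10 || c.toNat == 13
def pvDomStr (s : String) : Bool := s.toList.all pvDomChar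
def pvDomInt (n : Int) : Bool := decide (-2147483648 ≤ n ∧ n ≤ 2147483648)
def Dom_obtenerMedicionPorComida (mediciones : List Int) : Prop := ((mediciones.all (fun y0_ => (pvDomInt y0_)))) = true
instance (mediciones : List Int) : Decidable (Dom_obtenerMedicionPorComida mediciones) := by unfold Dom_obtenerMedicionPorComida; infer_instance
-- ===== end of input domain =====

-- B replaces A's single index loop with mod-6 branch dispatch by six strided slices mediciones[k::6] (idiomatic decomposition, same values).

-- ===== PORT A =====
-- loop body of A: append mediciones[i] to the bucket selected by i % 6 (branches in A's order)
def aStep (mediciones : List Int) (acc : List Int × List Int × List Int × List Int × List Int × List Int)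
    (i : Int) : List Int × List Int × List Int × List Int × List Int × List Int :=
  let b0 := acc.1; let b1 := acc.2.1; let b2 := acc.2.2.1
  let b3 := acc.2.2.2.1; let b4 := acc.2.2.2.2.1; let b5 := acc.2.2.2.2.2
  if i % 6 = 0 then (b0 ++ [PySem.List.pyGetD mediciones i 0], b1, b2, b3, b4, b5)
  else if i % 6 = 1 then (b0, b1 ++ [PySem.List.pyGetD mediciones i 0], b2, b3, b4, b5)
  else if i % 6 = 2 then (b0, b1, b2 ++ [PySem.List.pyGetD mediciones i 0], b3, b4, b5)
  else if i % 6 = 3 then (b0, b1, b2, b3 ++ [PySem.List.pyGetD mediciones i 0], b4, b5)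
  else if i % 6 = 4 then (b0, b1, b2, b3, b4 ++ [PySem.List.pyGetD mediciones i 0], b5)
  else if i % 6 = 5 then (b0, b1, b2, b3, b4, b5 ++ [PySem.List.pyGetD mediciones i 0])
  else (b0, b1, b2, b3, b4, b5)

-- for i in range(len(mediciones)): dispatch on i % 6  (mediciones[i] is always in range, ported as pyGetD)
def obtenerMedicionPorComida (mediciones : List Int) : List Int × List Int × List Int × List Int × List Int × List Int :=
  (PySem.List.pyRange 0 (mediciones.length : Int) 1).foldl (aStep mediciones) ([], [], [], [], [], [])

-- ===== PORT B =====
-- literal port of Source B: six strided slices mediciones[k::6]; slice? is some for the nonzero step 6, getD [] unwraps it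
def obtenerMedicionPorComida_alt (mediciones : List Int) : List Int × List Int × List Int × List Int × List Int × List Int :=
  ((PySem.List.slice? mediciones (some 0) none 6).getD [],
   (PySem.List.slice? mediciones (some 1) none 6).getD [],
   (PySem.List.slice? mediciones (some 2) none 6).getD [],
   (PySem.List.slice? mediciones (some 3) none 6).getD [],
   (PySem.List.slice? mediciones (some 4) none 6).getD [],
   (PySem.List.slice? mediciones (some 5) none 6).getD [])

-- ===== PRECONDITION & SPEC =====
def Spec_obtenerMedicionPorComida (mediciones : List Int) (out : List Int × List Int × List Int × List Int × List Int × List Int) : Prop := out = obtenerMedicionPorComida_alt mediciones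
instance (mediciones : List Int) (out : List Int × List Int × List Int × List Int × List Int × List Int) : Decidable (Spec_obtenerMedicionPorComida mediciones out) := by unfold Spec_obtenerMedicionPorComida; infer_instance

-- ===== CLAIM (what is proved, stated in full; the proofs are below) =====
def Claim_equal_obtenerMedicionPorComida : Prop := ∀ (mediciones : List Int), Dom_obtenerMedicionPorComida mediciones → Spec_obtenerMedicionPorComida mediciones (obtenerMedicionPorComida mediciones)

-- ===== LEMMAS AND PROOFS =====

-- reference: elements of xs at indices k, k+6, k+12, ... (what xs[k::6] selects)
def stride6 (xs : List Int) (k : Nat) : List Int :=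
  (List.range ((xs.length - k + 5) / 6)).filterMap (fun j => xs[k + 6 * j]?)

lemma slice6_eq_stride6 (xs : List Int) (k : Nat) (hk : k < 6) :
    PySem.List.slice? xs (some (k : Int)) none 6 = some (stride6 xs k) := by
  unfold PySem.List.slice? PySem.List.sliceIndices stride6
  simp only [if_neg (show ¬ ((6:Int) = 0) by norm_num), if_neg (show ¬ ((6:Int) < 0) by norm_num),
    if_neg (show ¬ ((k:Int) < 0) by omega), if_pos (show (0:Int) < 6 by norm_num),
    Option.some.injEq]
  rcases Nat.lt_or_ge k xs.length with h | h
  · rw [min_eq_left (by exact_mod_cast h.le), if_pos (by exact_mod_cast h)]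
    have hc : (((xs.length : Int) - (k : Int) + 6 - 1) / 6).toNat = (xs.length - k + 5) / 6 := by
      omega
    rw [hc]
    congr 1
  · rw [min_eq_right (by exact_mod_cast h), if_neg (lt_irrefl _)]
    have h0 : xs.length - k = 0 := Nat.sub_eq_zero_of_le h
    simp [h0]

lemma stride6_append (xs : List Int) (x : Int) (k : Nat) (hk : k < 6) :
    stride6 (xs ++ [x]) k = stride6 xs k ++ (if xs.length % 6 = k then [x] else []) := by
  unfold stride6
  simp only [List.length_append, List.length_singleton]
  by_cases hmod : xs.length % 6 = k
  · rw [if_pos hmod]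
    have hc : (xs.length + 1 - k + 5) / 6 = (xs.length - k + 5) / 6 + 1 := by omega
    rw [hc, List.range_succ, List.filterMap_append]
    congr 1
    · apply List.filterMap_congr
      intro j hj
      rw [List.mem_range] at hj
      rw [List.getElem?_append_left (by omega)]
    · have hq : k + 6 * ((xs.length - k + 5) / 6) = xs.length := by omega
      simp [hq]
  · rw [if_neg hmod]
    have hc : (xs.length + 1 - k + 5) / 6 = (xs.length - k + 5) / 6 := by omega
    rw [hc, List.append_nil]
    apply List.filterMap_congr
    intro j hj
    rw [List.mem_range] at hj
    rw [List.getElem?_append_left (by omega)]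

lemma alt_eq_stride6 (m : List Int) :
    obtenerMedicionPorComida_alt m =
      (stride6 m 0, stride6 m 1, stride6 m 2, stride6 m 3, stride6 m 4, stride6 m 5) := by
  unfold obtenerMedicionPorComida_alt
  have h0 : PySem.List.slice? m (some 0) none 6 = some (stride6 m 0) := by
    exact_mod_cast slice6_eq_stride6 m 0 (by norm_num)
  have h1 : PySem.List.slice? m (some 1) none 6 = some (stride6 m 1) := by
    exact_mod_cast slice6_eq_stride6 m 1 (by norm_num)
  have h2 : PySem.List.slice? m (some 2) none 6 = some (stride6 m 2) := by
    exact_mod_cast slice6_eq_stride6 m 2 (by norm_num)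
  have h3 : PySem.List.slice? m (some 3) none 6 = some (stride6 m 3) := by
    exact_mod_cast slice6_eq_stride6 m 3 (by norm_num)
  have h4 : PySem.List.slice? m (some 4) none 6 = some (stride6 m 4) := by
    exact_mod_cast slice6_eq_stride6 m 4 (by norm_num)
  have h5 : PySem.List.slice? m (some 5) none 6 = some (stride6 m 5) := by
    exact_mod_cast slice6_eq_stride6 m 5 (by norm_num)
  rw [h0, h1, h2, h3, h4, h5]
  rfl

lemma a_eq_stride6 (m : List Int) :
    obtenerMedicionPorComida m =
      (stride6 m 0, stride6 m 1, stride6 m 2, stride6 m 3, stride6 m 4, stride6 m 5) := by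
  induction m using List.reverseRecOn with
  | nil => rfl
  | append_singleton m x ih =>
    unfold obtenerMedicionPorComida
    have hlen : ((m ++ [x]).length : Int) = (m.length : Int) + 1 := by simp
    rw [hlen, PySem.List.pyRange_one_succ_right (by positivity), List.foldl_append]
    have hinner : (PySem.List.pyRange 0 (m.length : Int) 1).foldl (aStep (m ++ [x]))
        ([], [], [], [], [], []) = obtenerMedicionPorComida m := by
      unfold obtenerMedicionPorComida
      apply PySem.List.foldl_congr_mem
      intro acc i hi
      rw [PySem.List.mem_pyRange_one] at hi
      have hg : PySem.List.pyGetD (m ++ [x]) i 0 = PySem.List.pyGetD m i 0 := by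
        rw [PySem.List.pyGetD_of_nonneg _ _ hi.1, PySem.List.pyGetD_of_nonneg _ _ hi.1,
          List.getD_eq_getElem?_getD, List.getD_eq_getElem?_getD,
          List.getElem?_append_left (show i.toNat < m.length by omega)]
      unfold aStep
      simp only [hg]
    rw [hinner, ih]
    have hget : PySem.List.pyGetD (m ++ [x]) (m.length : Int) 0 = x := by
      rw [PySem.List.pyGetD_natCast]
      simp [List.getD_eq_getElem?_getD]
    have hmod6 : ((m.length : Int)) % 6 = ((m.length % 6 : Nat) : Int) := by omega
    have h6 : m.length % 6 < 6 := Nat.mod_lt _ (by norm_num)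
    simp only [List.foldl_cons, List.foldl_nil, aStep, hget, hmod6]
    interval_cases hm : m.length % 6 <;>
      simp [stride6_append m x 0 (by norm_num), stride6_append m x 1 (by norm_num),
        stride6_append m x 2 (by norm_num), stride6_append m x 3 (by norm_num),
        stride6_append m x 4 (by norm_num), stride6_append m x 5 (by norm_num), hm]

-- ===== VERDICT (by name: the statement is the Claim_ definition above) =====
theorem obtenerMedicionPorComida_spec : Claim_equal_obtenerMedicionPorComida := by
  intro m _
  unfold Spec_obtenerMedicionPorComida
  rw [a_eq_stride6, alt_eq_stride6]
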